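-- pv_equiv track=rewrite | github.com/hdsjejgh/USACOProblems | Silver/2024SilverDecember1.py | solve
-- ===== SOURCE A (Python) =====
-- from itertools import accumulate
--
-- def solve(C):
--     b = 0
--     e = 0
--     p = [0]+list(accumulate(C))
--
--     L = len(C)//2 +1
--     minimum = float('inf')
--     mid = -1
--     for i in range(len(C)-L+1):
--         m = p[i+L]-p[i]
--         if m<minimum:
--             minimum = m
--             mid = i-L+2
--     b = minimum
--
--     e = sum(C)-b
--
--     return str(b),str(e)
-- ===== SOURCE B (Python) =====
-- def solve(C):
--     L = len(C)//2 + 1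
--     minimum = float('inf')
--     s = 0
--     for i in range(len(C)-L+1):
--         if i == 0:
--             s = sum(C[0:L])
--         else:
--             s += C[i+L-1] - C[i-1]
--         if s < minimum:
--             minimum = s
--     b = minimum
--     e = sum(C) - b
--     return str(b), str(e)
-- ===== Notes on version B (the rewrite author's own statement) =====
-- stated objective: simpler
-- what changed: Drops A's prefix-sum array and unused mid tracking; B maintains a single rolling window sum updated in place while scanning the window starts.
import Mathlib
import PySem

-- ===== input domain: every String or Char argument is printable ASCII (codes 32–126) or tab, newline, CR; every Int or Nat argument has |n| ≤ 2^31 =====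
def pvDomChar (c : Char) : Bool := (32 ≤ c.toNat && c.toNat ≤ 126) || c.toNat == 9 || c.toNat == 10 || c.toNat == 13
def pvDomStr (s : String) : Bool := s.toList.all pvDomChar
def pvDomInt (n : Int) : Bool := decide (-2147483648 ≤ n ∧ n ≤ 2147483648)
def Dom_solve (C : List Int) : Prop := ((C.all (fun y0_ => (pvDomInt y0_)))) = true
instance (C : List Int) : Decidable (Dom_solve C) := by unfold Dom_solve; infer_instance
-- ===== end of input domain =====

-- B replaces A's prefix-sum array (and unused 'mid' tracking) by a rolling window sum: simpler, same O(n).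
-- Python's 'minimum = float('inf')' is modeled exactly as Option Int (none = +inf); on the empty list the
-- loop never runs and A returns ('inf','-inf') (str of the float infinities), mirrored by the 'none' branch.

-- ===== PORT A =====
-- itertools.accumulate
def pvAccum (acc : Int) : List Int → List Int
  | [] => []
  | x :: xs => (acc + x) :: pvAccum (acc + x) xs

def solve (C : List Int) : String × String :=
  let p : List Int := 0 :: pvAccum 0 C
  let L : Int := PySem.Int.floordiv (C.length : Int) 2 + 1
  let st := (PySem.List.pyRange 0 ((C.length : Int) - L + 1) 1).foldl
    (fun (st : Option Int × Int) i =>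
      -- indices i and i+L are always in range of p, so pyGetD is exact here
      let m := PySem.List.pyGetD p (i + L) 0 - PySem.List.pyGetD p i 0
      match st.1 with
      | none => (some m, i - L + 2)
      | some v => if m < v then (some m, i - L + 2) else st)
    ((none : Option Int), (-1 : Int))
  match st.1 with
  | none => ("inf", "-inf")
  | some v => (PySem.Int.toStr v, PySem.Int.toStr (C.sum - v))

-- ===== PORT B =====
def solve_alt (C : List Int) : String × String :=
  let L : Int := PySem.Int.floordiv (C.length : Int) 2 + 1
  let st := (PySem.List.pyRange 0 ((C.length : Int) - L + 1) 1).foldl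
    (fun (st : Int × Option Int) i =>
      let s := if i = 0 then (PySem.List.slice C (some 0) (some L)).sum
               -- indices i+L-1 and i-1 are always in range of C, so pyGetD is exact here
               else st.1 + PySem.List.pyGetD C (i + L - 1) 0 - PySem.List.pyGetD C (i - 1) 0
      let m := match st.2 with
               | none => some s
               | some v => if s < v then some s else some v
      (s, m))
    ((0 : Int), (none : Option Int))
  match st.2 with
  | none => ("inf", "-inf")
  | some v => (PySem.Int.toStr v, PySem.Int.toStr (C.sum - v))

-- ===== PRECONDITION & SPEC =====
def Spec_solve (C : List Int) (out : String × String) : Prop := out = solve_alt C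
instance (C : List Int) (out : String × String) : Decidable (Spec_solve C out) := by unfold Spec_solve; infer_instance

-- ===== CLAIM (what is proved, stated in full; the proofs are below) =====
def Claim_equal_solve : Prop := ∀ (C : List Int), Dom_solve C → Spec_solve C (solve C)

-- ===== LEMMAS AND PROOFS =====

-- window sum of length n/2+1 starting at j
def pvW (C : List Int) (j : ℕ) : Int := ((C.drop j).take (C.length / 2 + 1)).sum
-- Python's min update with none = +inf
def pvUpd (acc : Option Int) (s : Int) : Option Int :=
  match acc with | none => some s | some v => if s < v then some s else some v
def pvFm (C : List Int) (m : ℕ) : Option Int :=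
  (List.range m).foldl (fun acc j => pvUpd acc (pvW C j)) none
-- number of windows
def pvK (C : List Int) : ℕ := C.length - C.length / 2
def pvRender (C : List Int) (o : Option Int) : String × String :=
  match o with
  | none => ("inf", "-inf")
  | some v => (PySem.Int.toStr v, PySem.Int.toStr (C.sum - v))

lemma pvS_succ (C : List Int) (t : ℕ) (h : t < C.length) :
    (C.take (t+1)).sum = (C.take t).sum + C.getD t 0 := by
  rw [List.take_add_one, List.sum_append]
  simp [List.getD_eq_getElem?_getD, List.getElem?_eq_getElem h]

lemma pvW_eq (C : List Int) (j : ℕ) :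
    pvW C j = (C.take (j + (C.length/2+1))).sum - (C.take j).sum := by
  rw [List.take_add, List.sum_append, pvW]; ring

lemma pvRoll (C : List Int) (j : ℕ) (h : j + (C.length/2+1) < C.length) :
    pvW C (j+1) = pvW C j + C.getD (j + (C.length/2+1)) 0 - C.getD j 0 := by
  have h1 : j < C.length := by omega
  rw [pvW_eq, pvW_eq, show j + 1 + (C.length/2+1) = (j + (C.length/2+1)) + 1 by omega,
     pvS_succ C _ h, pvS_succ C j h1]
  ring

lemma pvAccum_getD (xs : List Int) (acc : Int) (j : ℕ) (h : j ≤ xs.length) :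
    (acc :: pvAccum acc xs).getD j 0 = acc + (xs.take j).sum := by
  induction xs generalizing acc j with
  | nil =>
    simp at h; subst h; simp
  | cons x xs ih =>
    cases j with
    | zero => simp
    | succ j =>
      have := ih (acc + x) j (by simpa using h)
      simp only [pvAccum, List.getD_cons_succ, List.take_succ_cons, List.sum_cons]
      rw [this]; ring

lemma pvA_loop (f : (Option Int × Int) → ℕ → Option Int × Int) (w : ℕ → Int) (M : ℕ)
    (hs : ∀ st k, k < M → (f st k).1 = pvUpd st.1 (w k))
    (m : ℕ) (hm : m ≤ M) :
    ((List.range m).foldl f ((none : Option Int), (-1 : Int))).1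
      = (List.range m).foldl (fun acc j => pvUpd acc (w j)) none := by
  induction m with
  | zero => simp
  | succ m ih =>
    rw [List.range_succ, List.foldl_append, List.foldl_append]
    simp only [List.foldl_cons, List.foldl_nil]
    rw [hs _ m (by omega), ih (by omega)]

lemma pvB_loop (f : (Int × Option Int) → ℕ → Int × Option Int) (w : ℕ → Int) (M : ℕ)
    (h0 : ∀ st, f st 0 = (w 0, pvUpd st.2 (w 0)))
    (hs : ∀ st k, 0 < k → k < M → st.1 = w (k-1) → f st k = (w k, pvUpd st.2 (w k)))
    (m : ℕ) (h1 : 1 ≤ m) (hm : m ≤ M) :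
    (List.range m).foldl f ((0 : Int), (none : Option Int))
      = (w (m-1), (List.range m).foldl (fun acc j => pvUpd acc (w j)) none) := by
  induction m with
  | zero => omega
  | succ m ih =>
    rcases Nat.eq_or_lt_of_le h1 with h | h
    · simp only [← h]
      simp [List.range_succ, h0]
    · have hm1 : 1 ≤ m := by omega
      rw [List.range_succ, List.foldl_append, List.foldl_append]
      simp only [List.foldl_cons, List.foldl_nil]
      rw [ih hm1 (by omega)]
      rw [hs _ m (by omega) (by omega) rfl]
      simp

lemma pv_hL (C : List Int) :
    PySem.Int.floordiv (C.length : Int) 2 + 1 = ((C.length/2 + 1 : ℕ) : Int) := by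
  rw [PySem.Int.floordiv_eq_ediv_of_pos (by omega)]
  omega

lemma pv_hK (C : List Int) :
    ((C.length : Int) - ((C.length/2 + 1 : ℕ) : Int) + 1) = ((pvK C : ℕ) : Int) := by
  unfold pvK; push_cast; omega

lemma solve_eq (C : List Int) : solve C = pvRender C (pvFm C (pvK C)) := by
  unfold solve
  dsimp only
  rw [pv_hL C, pv_hK C, PySem.List.pyRange_one]
  simp only [Int.sub_zero, Int.toNat_natCast, zero_add]
  rw [List.foldl_map]
  rw [pvA_loop _ (pvW C) (pvK C) ?hs (pvK C) le_rfl]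
  · show _ = pvRender C (pvFm C (pvK C))
    rw [← pvFm]
    cases pvFm C (pvK C) <;> simp [pvRender]
  case hs =>
    intro st k hk
    have hkn : k + (C.length/2+1) ≤ C.length := by unfold pvK at hk; omega
    have hm : PySem.List.pyGetD (0 :: pvAccum 0 C) ((k:ℕ) + ((C.length/2+1 : ℕ) : Int)) 0
        - PySem.List.pyGetD (0 :: pvAccum 0 C) ((k:ℕ) : Int) 0 = pvW C k := by
      rw [show ((k:ℕ) + ((C.length/2+1 : ℕ) : Int)) = ((k + (C.length/2+1) : ℕ) : Int) by push_cast; ring]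
      simp only [PySem.List.pyGetD_natCast]
      rw [pvAccum_getD C 0 _ hkn, pvAccum_getD C 0 k (by omega), pvW_eq]
      ring
    rw [hm]
    obtain ⟨a, b⟩ := st
    cases a with
    | none => rfl
    | some v => simp only [pvUpd]; split_ifs <;> rfl

lemma solve_alt_eq (C : List Int) : solve_alt C = pvRender C (pvFm C (pvK C)) := by
  unfold solve_alt
  dsimp only
  rw [pv_hL C, pv_hK C, PySem.List.pyRange_one]
  simp only [Int.sub_zero, Int.toNat_natCast, zero_add]
  rw [List.foldl_map]
  rcases Nat.eq_zero_or_pos (pvK C) with hz | hpos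
  · rw [hz]
    simp [pvFm, pvRender]
  · rw [pvB_loop _ (pvW C) (pvK C) ?h0 ?hs (pvK C) hpos le_rfl]
    · rw [← pvFm]
      cases pvFm C (pvK C) <;> simp [pvRender]
    case h0 =>
      intro st
      simp only [Nat.cast_zero]
      have hsl : (PySem.List.slice C (some 0) (some ((C.length/2+1 : ℕ) : Int))).sum = pvW C 0 := by
        rw [PySem.List.slice_toNat (xs := C) (by omega) (by omega)]
        simp [pvW]
        congr 1
      rw [hsl]
      cases st.2 <;> simp [pvUpd]
    case hs =>
      intro st k hk0 hkK h1
      have hkn : (k - 1) + (C.length/2+1) < C.length := by unfold pvK at hkK; omega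
      have hif : ((k:ℕ) : Int) ≠ 0 := by omega
      rw [if_neg hif]
      have e1 : ((k:ℕ) : Int) + ((C.length/2+1 : ℕ) : Int) - 1 = (((k-1) + (C.length/2+1) : ℕ) : Int) := by
        push_cast [hk0]; omega
      have e2 : ((k:ℕ) : Int) - 1 = ((k-1 : ℕ) : Int) := by push_cast [hk0]; omega
      rw [e1, e2]
      simp only [PySem.List.pyGetD_natCast]
      rw [h1]
      have hs2 : pvW C (k-1) + C.getD ((k-1) + (C.length/2+1)) 0 - C.getD (k-1) 0 = pvW C k := by
        rw [← pvRoll C (k-1) hkn, show k - 1 + 1 = k by omega]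
      rw [hs2]
      cases st.2 <;> simp [pvUpd]

-- ===== VERDICT (by name: the statement is the Claim_ definition above) =====
theorem solve_spec : Claim_equal_solve := by
  intro C _
  unfold Spec_solve
  rw [solve_eq, solve_alt_eq]
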